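-- pv_equiv track=rewrite | github.com/Chini568/entregas | tarea_stark.01.py | tipo_inteligencia
-- ===== SOURCE A (Python) =====
-- def tipo_inteligencia(lista):
--     tipos_de_inteligencia = {
--         "average" : [],
--         "good" : [],
--         "high" : [],
--         "" : [],
--     }
--     for i in lista:
--         inteligencia = i["inteligencia"].lower()
--         nombre = i["nombre"]
--
--         if inteligencia in tipos_de_inteligencia:
--             tipos_de_inteligencia[inteligencia].append(nombre)
--     return tipos_de_inteligencia
-- ===== SOURCE B (Python) =====
-- def tipo_inteligencia(lista):
--     # One pass extracting (type, name) pairs, then one filter pass per fixed category.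
--     pares = [(i["inteligencia"].lower(), i["nombre"]) for i in lista]
--     return {cat: [n for (t, n) in pares if t == cat]
--             for cat in ("average", "good", "high", "")}
-- ===== Notes on version B (the rewrite author's own statement) =====
-- stated objective: alternative
-- what changed: B replaces A's single categorizing loop that appends into a pre-built dict with a two-pass shape: first build a (type, name) pair table, then a dict comprehension that filters that table once per fixed category.
import Mathlib
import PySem

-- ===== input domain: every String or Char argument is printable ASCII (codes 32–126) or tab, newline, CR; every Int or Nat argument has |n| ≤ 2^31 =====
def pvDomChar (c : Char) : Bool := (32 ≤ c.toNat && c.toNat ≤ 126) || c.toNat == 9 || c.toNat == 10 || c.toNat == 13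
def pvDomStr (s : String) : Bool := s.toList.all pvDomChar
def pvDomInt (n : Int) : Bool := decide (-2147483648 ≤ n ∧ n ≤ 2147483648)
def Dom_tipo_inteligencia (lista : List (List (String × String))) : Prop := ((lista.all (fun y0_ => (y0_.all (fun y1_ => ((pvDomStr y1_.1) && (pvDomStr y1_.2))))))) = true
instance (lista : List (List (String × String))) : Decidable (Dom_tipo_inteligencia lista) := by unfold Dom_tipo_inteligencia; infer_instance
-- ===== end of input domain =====

-- B changes the decomposition only (same O(n·categories) cost): pair table + per-category filter
-- instead of A's one appending loop into a pre-built dict.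

-- ===== PORT A =====
-- A's loop: pre-built dict with the four keys, then one pass appending each nombre
-- into the bucket of its (lowered) inteligencia when that bucket exists.
-- i["inteligencia"] / i["nombre"] are exact under Pre_ (both keys present); the .getD ""
-- is only the totalisation of the KeyError case that Pre_ excludes.
def tipo_inteligencia (lista : List (List (String × String))) : List (String × List String) :=
  (lista.foldl
    (fun d i =>
      let inteligencia := PySem.Str.lower (((PySem.Dict.mk i).get? "inteligencia").getD "")
      let nombre := ((PySem.Dict.mk i).get? "nombre").getD ""
      if d.contains inteligencia then d.modify inteligencia [] (fun l => l ++ [nombre]) else d)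
    (PySem.Dict.mk [("average", []), ("good", []), ("high", []), ("", [])])).items

-- ===== PORT B =====
def tipo_inteligencia_alt (lista : List (List (String × String))) : List (String × List String) :=
  let pares := lista.map (fun i =>
    (PySem.Str.lower (((PySem.Dict.mk i).get? "inteligencia").getD ""),
     ((PySem.Dict.mk i).get? "nombre").getD ""))
  ["average", "good", "high", ""].map
    (fun cat => (cat, (pares.filter (fun p => p.1 == cat)).map (·.2)))

-- ===== PRECONDITION & SPEC =====
-- Pre_ excludes exactly the inputs where A raises KeyError: an element missing the
-- "inteligencia" or "nombre" key.
def Pre_tipo_inteligencia (lista : List (List (String × String))) : Prop :=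
  (lista.all (fun i => (PySem.Dict.mk i).contains "inteligencia" && (PySem.Dict.mk i).contains "nombre")) = true
instance (lista : List (List (String × String))) : Decidable (Pre_tipo_inteligencia lista) := by unfold Pre_tipo_inteligencia; infer_instance
def pvWitness_tipo_inteligencia : (List (List (String × String))) :=
  [[("inteligencia", "High"), ("nombre", "Tony")], [("inteligencia", "dumb"), ("nombre", "x")]]

def Spec_tipo_inteligencia (lista : List (List (String × String))) (out : List (String × List String)) : Prop := out = tipo_inteligencia_alt lista
instance (lista : List (List (String × String))) (out : List (String × List String)) : Decidable (Spec_tipo_inteligencia lista out) := by unfold Spec_tipo_inteligencia; infer_instance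

-- ===== CLAIM (what is proved, stated in full; the proofs are below) =====
def Claim_equal_tipo_inteligencia : Prop := ∀ (lista : List (List (String × String))), Dom_tipo_inteligencia lista → Pre_tipo_inteligencia lista → Spec_tipo_inteligencia lista (tipo_inteligencia lista)

-- ===== LEMMAS AND PROOFS =====

-- the loop invariant: folding A's step over l from the explicit four-bucket dict
theorem tipo_foldA (l : List (List (String × String))) (a g h e : List String) :
    l.foldl
      (fun d i =>
        let inteligencia := PySem.Str.lower (((PySem.Dict.mk i).get? "inteligencia").getD "")
        let nombre := ((PySem.Dict.mk i).get? "nombre").getD ""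
        if d.contains inteligencia then d.modify inteligencia [] (fun l => l ++ [nombre]) else d)
      (PySem.Dict.mk [("average", a), ("good", g), ("high", h), ("", e)])
    = PySem.Dict.mk
        [("average", a ++ (l.map (fun i =>
            (PySem.Str.lower (((PySem.Dict.mk i).get? "inteligencia").getD ""),
             ((PySem.Dict.mk i).get? "nombre").getD "")) |>.filter (fun p => p.1 == "average")).map (·.2)),
         ("good", g ++ (l.map (fun i =>
            (PySem.Str.lower (((PySem.Dict.mk i).get? "inteligencia").getD ""),
             ((PySem.Dict.mk i).get? "nombre").getD "")) |>.filter (fun p => p.1 == "good")).map (·.2)),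
         ("high", h ++ (l.map (fun i =>
            (PySem.Str.lower (((PySem.Dict.mk i).get? "inteligencia").getD ""),
             ((PySem.Dict.mk i).get? "nombre").getD "")) |>.filter (fun p => p.1 == "high")).map (·.2)),
         ("", e ++ (l.map (fun i =>
            (PySem.Str.lower (((PySem.Dict.mk i).get? "inteligencia").getD ""),
             ((PySem.Dict.mk i).get? "nombre").getD "")) |>.filter (fun p => p.1 == "")).map (·.2))] := by
  induction l generalizing a g h e with
  | nil => simp
  | cons x xs ih =>
    simp only [List.foldl_cons, List.map_cons, List.filter_cons]
    by_cases h1 : PySem.Str.lower (((PySem.Dict.mk x).get? "inteligencia").getD "") = "average"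
    · rw [h1, if_pos (by simp [PySem.Dict.contains]),
          show (PySem.Dict.mk [("average", a), ("good", g), ("high", h), ("", e)]).modify "average" []
              (fun l => l ++ [(((PySem.Dict.mk x).get? "nombre").getD "")]) = PySem.Dict.mk [("average", a ++ [(((PySem.Dict.mk x).get? "nombre").getD "")]), ("good", g), ("high", h), ("", e)] from by
            simp [PySem.Dict.modify, PySem.Dict.insert, PySem.Dict.contains, PySem.Dict.getD, PySem.Dict.get?], ih]
      simp
    · by_cases h2 : PySem.Str.lower (((PySem.Dict.mk x).get? "inteligencia").getD "") = "good"
      · rw [h2, if_pos (by simp [PySem.Dict.contains]),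
            show (PySem.Dict.mk [("average", a), ("good", g), ("high", h), ("", e)]).modify "good" []
                (fun l => l ++ [(((PySem.Dict.mk x).get? "nombre").getD "")]) = PySem.Dict.mk [("average", a), ("good", g ++ [(((PySem.Dict.mk x).get? "nombre").getD "")]), ("high", h), ("", e)] from by
              simp [PySem.Dict.modify, PySem.Dict.insert, PySem.Dict.contains, PySem.Dict.getD, PySem.Dict.get?], ih]
        simp
      · by_cases h3 : PySem.Str.lower (((PySem.Dict.mk x).get? "inteligencia").getD "") = "high"
        · rw [h3, if_pos (by simp [PySem.Dict.contains]),
              show (PySem.Dict.mk [("average", a), ("good", g), ("high", h), ("", e)]).modify "high" []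
                  (fun l => l ++ [(((PySem.Dict.mk x).get? "nombre").getD "")]) = PySem.Dict.mk [("average", a), ("good", g), ("high", h ++ [(((PySem.Dict.mk x).get? "nombre").getD "")]), ("", e)] from by
                simp [PySem.Dict.modify, PySem.Dict.insert, PySem.Dict.contains, PySem.Dict.getD, PySem.Dict.get?], ih]
          simp
        · by_cases h4 : PySem.Str.lower (((PySem.Dict.mk x).get? "inteligencia").getD "") = ""
          · rw [h4, if_pos (by simp [PySem.Dict.contains]),
                show (PySem.Dict.mk [("average", a), ("good", g), ("high", h), ("", e)]).modify "" []
                    (fun l => l ++ [(((PySem.Dict.mk x).get? "nombre").getD "")]) = PySem.Dict.mk [("average", a), ("good", g), ("high", h), ("", e ++ [(((PySem.Dict.mk x).get? "nombre").getD "")])] from by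
                  simp [PySem.Dict.modify, PySem.Dict.insert, PySem.Dict.contains, PySem.Dict.getD, PySem.Dict.get?], ih]
            simp
          · have hc : ((PySem.Dict.mk [("average", a), ("good", g), ("high", h), ("", e)]).contains
                (PySem.Str.lower (((PySem.Dict.mk x).get? "inteligencia").getD ""))) = false := by
              simp [PySem.Dict.contains, Ne.symm h1, Ne.symm h2, Ne.symm h3, Ne.symm h4]
            rw [if_neg (by simp [hc]), ih]
            simp [h1, h2, h3, h4]

-- ===== VERDICT (by name: the statement is the Claim_ definition above) =====
theorem tipo_inteligencia_spec : Claim_equal_tipo_inteligencia := by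
  intro lista _ _
  show tipo_inteligencia lista = tipo_inteligencia_alt lista
  simp [tipo_inteligencia, tipo_inteligencia_alt, tipo_foldA]
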